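-- pv_equiv track=rewrite | github.com/arthurcrawford/test2 | src/main/python/raptly/debian_version.py | verrevcmp
-- ===== SOURCE A (Python) =====
-- def order(x):
--     """
--     Determine sort order of char (x)
--
--     :param x: character to test
--     :return: order value
--
--     char class   order value
--     ----------   -----------
--     '~'           -1
--     digits        0
--     empty         0
--     letters       ascii x
--     non-letters   ascii x + 256
--     """
--     return \
--         -1 if x == '~' \
--             else 0 if x.isdigit() \
--             else 0 if not x \
--             else ord(x) if x.isalpha() \
--             else ord(x) + 256
--
-- def verrevcmp(val, ref):
--     """Return result of comparing upstream_version or debian_revision strings val and ref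
--
--     return < 0 if val is less than ref
--     return 0 if val and ref equal
--     return > 0 if val is greater than ref
--     """
--
--     if not val:
--         val = ''
--     if not ref:
--         ref = ''
--
--     # Whilst we haven't reached the end of both strings yet
--     while val or ref:
--
--         first_diff = 0
--
--         # Whilst one of the strings has some non-digits
--         while (val and not val[0].isdigit()) or (ref and not ref[0].isdigit()):
--
--             # Determine the alphanumeric ordering
--             vc = order(val[0] if val else '')
--             rc = order(ref[0] if ref else '')
--
--             if vc != rc:
--                 return vc - rc
--
--             val = val[1:] if val else ''
--             ref = ref[1:] if ref else ''
--
--         # At least one string has ended a run of non-digits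
--
--         # Discard any 0 padding from numerical sequences
--         while val and val[0] == '0':
--             val = val[1:]
--         while ref and ref[0] == '0':
--             ref = ref[1:]
--
--         # While we're still seeing digits in both strings
--         while (val and val[0].isdigit()) and (ref and ref[0].isdigit()):
--
--             if not first_diff:
--                 first_diff = ord(val[0]) - ord(ref[0])
--
--             val = val[1:]
--             ref = ref[1:]
--
--         # If we're still processing digits in val
--         if val and val[0].isdigit():
--             # val must be the greater version
--             return 1
--
--         # If we're still processing digits in ref
--         if ref and ref[0].isdigit():
--             # ref must be the greater version
--             return -1
--
--         # Same number of digits in this segment - return first numerical diff if there was one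
--         if first_diff:
--             return first_diff
--
--     # Versions equal
--     return 0
-- ===== SOURCE B (Python) =====
-- def _order(c):
--     """Order value of a single character (never called on an empty string)."""
--     if c == '~':
--         return -1
--     if c.isdigit():
--         return 0
--     return ord(c) if c.isalpha() else ord(c) + 256
--
--
-- def verrevcmp(val, ref):
--     """Single pass with index pointers: no string slicing, O(len(val)+len(ref))."""
--     val = val or ''
--     ref = ref or ''
--     i, j, n, m = 0, 0, len(val), len(ref)
--     while i < n or j < m:
--         first_diff = 0
--
--         # run of non-digits (an exhausted string counts as order 0)
--         while (i < n and not val[i].isdigit()) or (j < m and not ref[j].isdigit()):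
--             vc = _order(val[i]) if i < n else 0
--             rc = _order(ref[j]) if j < m else 0
--             if vc != rc:
--                 return vc - rc
--             if i < n:
--                 i += 1
--             if j < m:
--                 j += 1
--
--         # skip leading zeros of the numeric runs
--         while i < n and val[i] == '0':
--             i += 1
--         while j < m and ref[j] == '0':
--             j += 1
--
--         # walk both numeric runs in lockstep, remembering the first digit diff
--         while i < n and val[i].isdigit() and j < m and ref[j].isdigit():
--             if not first_diff:
--                 first_diff = ord(val[i]) - ord(ref[j])
--             i += 1
--             j += 1
--
--         if i < n and val[i].isdigit():
--             return 1
--         if j < m and ref[j].isdigit():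
--             return -1
--         if first_diff:
--             return first_diff
--     return 0
-- ===== Notes on version B (the rewrite author's own statement) =====
-- stated objective: faster
-- what changed: Replaced A's repeated string re-slicing (val = val[1:] on every character, O(n) copy each) by a single pass with index pointers i/j over the unchanged strings.
import Mathlib
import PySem

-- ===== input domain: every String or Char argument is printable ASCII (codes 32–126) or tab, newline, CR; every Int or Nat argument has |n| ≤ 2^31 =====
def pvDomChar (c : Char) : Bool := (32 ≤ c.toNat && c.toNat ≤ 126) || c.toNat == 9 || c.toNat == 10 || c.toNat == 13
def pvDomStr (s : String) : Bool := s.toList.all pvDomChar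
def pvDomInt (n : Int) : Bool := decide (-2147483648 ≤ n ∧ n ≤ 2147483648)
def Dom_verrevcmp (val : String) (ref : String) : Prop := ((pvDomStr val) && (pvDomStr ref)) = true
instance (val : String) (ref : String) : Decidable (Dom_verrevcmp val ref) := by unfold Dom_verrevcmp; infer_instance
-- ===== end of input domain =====

-- B replaces A's repeated string slicing (val = val[1:] each step, O(n^2)) by a single
-- pass with index pointers over the unchanged strings (O(n)); same return value everywhere.

-- ===== PORT A =====
-- A consumes the strings by slicing; ported on List Char, slice val[1:] = List.tail.
-- order(x): x is a 1-char string or '' → List Char ([] = '').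
def orderA (x : List Char) : Int :=
  if x = ['~'] then -1
  else if PySem.Chars.strIsdigit x then 0
  else if x = [] then 0
  else if PySem.Chars.strIsalpha x then ((x.headD ' ').toNat : Int)  -- ord(x), x has length 1 here
  else ((x.headD ' ').toNat : Int) + 256

-- `val and not val[0].isdigit()`
def hdNotDigit (s : List Char) : Bool :=
  match s.head? with
  | none => false
  | some c => !PySem.Chars.isdigit c

-- `val and val[0].isdigit()`
def hdIsDigit (s : List Char) : Bool :=
  match s.head? with
  | none => false
  | some c => PySem.Chars.isdigit c

-- `val[0] if val else ''`
def hd1 (s : List Char) : List Char :=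
  match s.head? with
  | none => []
  | some c => [c]

-- inner while: run of non-digits (fuel only makes the loop total; it is always sufficient)
def aLoop1 : Nat → List Char → List Char → Sum Int (List Char × List Char)
  | 0, val, ref => Sum.inr (val, ref)
  | f+1, val, ref =>
    if hdNotDigit val || hdNotDigit ref then
      let vc := orderA (hd1 val)
      let rc := orderA (hd1 ref)
      if vc ≠ rc then Sum.inl (vc - rc)
      else aLoop1 f val.tail ref.tail
    else Sum.inr (val, ref)

-- `while val and val[0] == '0': val = val[1:]`
def aStrip : List Char → List Char
  | [] => []
  | c :: rest => if c = '0' then aStrip rest else c :: rest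

-- inner while: digits in both strings
def aLoop3 : Nat → List Char → List Char → Int → List Char × List Char × Int
  | 0, val, ref, fd => (val, ref, fd)
  | f+1, val, ref, fd =>
    if hdIsDigit val && hdIsDigit ref then
      let fd' := if fd = 0 then ((val.headD ' ').toNat : Int) - ((ref.headD ' ').toNat : Int) else fd
      aLoop3 f val.tail ref.tail fd'
    else (val, ref, fd)

-- outer `while val or ref`
def aOuter : Nat → List Char → List Char → Int
  | 0, _, _ => 0
  | f+1, val, ref =>
    if val = [] ∧ ref = [] then 0
    else
      match aLoop1 (val.length + ref.length) val ref with
      | Sum.inl res => res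
      | Sum.inr (v1, r1) =>
        let v2 := aStrip v1
        let r2 := aStrip r1
        match aLoop3 (v2.length + r2.length) v2 r2 0 with
        | (v3, r3, fd) =>
          if hdIsDigit v3 then 1
          else if hdIsDigit r3 then -1
          else if fd ≠ 0 then fd
          else aOuter f v3 r3

def verrevcmp (val : String) (ref : String) : Int :=
  aOuter (val.toList.length + ref.toList.length + 1) val.toList ref.toList

-- ===== PORT B =====
-- B walks the fixed strings with index pointers i, j; no slicing.
def orderB (c : Char) : Int :=
  if c = '~' then -1
  else if PySem.Chars.isdigit c then 0
  else if PySem.Chars.isalpha c then (c.toNat : Int)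
  else (c.toNat : Int) + 256

-- `i < n and val[i].isdigit()`
def digAt (V : List Char) (i : Nat) : Bool :=
  decide (i < V.length) && PySem.Chars.isdigit (V.getD i ' ')

def bLoop1 : Nat → List Char → List Char → Nat → Nat → Sum Int (Nat × Nat)
  | 0, _, _, i, j => Sum.inr (i, j)
  | f+1, V, R, i, j =>
    if (decide (i < V.length) && !PySem.Chars.isdigit (V.getD i ' '))
        || (decide (j < R.length) && !PySem.Chars.isdigit (R.getD j ' ')) then
      let vc := if i < V.length then orderB (V.getD i ' ') else 0
      let rc := if j < R.length then orderB (R.getD j ' ') else 0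
      if vc ≠ rc then Sum.inl (vc - rc)
      else bLoop1 f V R (if i < V.length then i+1 else i) (if j < R.length then j+1 else j)
    else Sum.inr (i, j)

-- `while i < n and val[i] == '0': i += 1`
def bStrip : Nat → List Char → Nat → Nat
  | 0, _, i => i
  | f+1, V, i => if i < V.length ∧ V.getD i ' ' = '0' then bStrip f V (i+1) else i

def bLoop3 : Nat → List Char → List Char → Nat → Nat → Int → Nat × Nat × Int
  | 0, _, _, i, j, fd => (i, j, fd)
  | f+1, V, R, i, j, fd =>
    if digAt V i && digAt R j then
      let fd' := if fd = 0 then ((V.getD i ' ').toNat : Int) - ((R.getD j ' ').toNat : Int) else fd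
      bLoop3 f V R (i+1) (j+1) fd'
    else (i, j, fd)

def bOuter : Nat → List Char → List Char → Nat → Nat → Int
  | 0, _, _, _, _ => 0
  | f+1, V, R, i, j =>
    if i < V.length ∨ j < R.length then
      match bLoop1 ((V.length - i) + (R.length - j)) V R i j with
      | Sum.inl res => res
      | Sum.inr (i1, j1) =>
        let i2 := bStrip (V.length - i1) V i1
        let j2 := bStrip (R.length - j1) R j1
        match bLoop3 ((V.length - i2) + (R.length - j2)) V R i2 j2 0 with
        | (i3, j3, fd) =>
          if digAt V i3 then 1
          else if digAt R j3 then -1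
          else if fd ≠ 0 then fd
          else bOuter f V R i3 j3
    else 0

def verrevcmp_alt (val : String) (ref : String) : Int :=
  bOuter (val.toList.length + ref.toList.length + 1) val.toList ref.toList 0 0

-- ===== PRECONDITION & SPEC =====
def Spec_verrevcmp (val : String) (ref : String) (out : Int) : Prop := out = verrevcmp_alt val ref
instance (val : String) (ref : String) (out : Int) : Decidable (Spec_verrevcmp val ref out) := by unfold Spec_verrevcmp; infer_instance

-- ===== CLAIM (what is proved, stated in full; the proofs are below) =====
def Claim_equal_verrevcmp : Prop := ∀ (val : String) (ref : String), Dom_verrevcmp val ref → Spec_verrevcmp val ref (verrevcmp val ref)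

-- ===== LEMMAS AND PROOFS =====
theorem order_singleton (c : Char) : orderA [c] = orderB c := by
  simp only [orderA, orderB, PySem.Chars.strIsdigit, PySem.Chars.strIsalpha, List.headD]
  simp only [List.all_cons, List.all_nil, Bool.and_true, List.cons_ne_nil,
    List.cons.injEq, and_true, if_false]
  rfl

theorem orderA_nil : orderA [] = 0 := by decide

theorem hdNotDigit_drop (V : List Char) (i : Nat) :
    hdNotDigit (V.drop i) = (decide (i < V.length) && !PySem.Chars.isdigit (V.getD i ' ')) := by
  by_cases h : i < V.length
  · simp [hdNotDigit, List.head?_drop, List.getD_eq_getElem?_getD, h]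
  · simp [hdNotDigit, List.head?_drop, h]

theorem hdIsDigit_drop (V : List Char) (i : Nat) :
    hdIsDigit (V.drop i) = digAt V i := by
  by_cases h : i < V.length
  · simp [hdIsDigit, digAt, List.head?_drop, List.getD_eq_getElem?_getD, h]
  · simp [hdIsDigit, digAt, List.head?_drop, h]

theorem order_hd1_drop (V : List Char) (i : Nat) :
    orderA (hd1 (V.drop i)) = (if i < V.length then orderB (V.getD i ' ') else 0) := by
  by_cases h : i < V.length
  · simp [hd1, List.head?_drop, List.getD_eq_getElem?_getD, h, order_singleton]
  · simp [hd1, List.head?_drop, h, orderA_nil]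

theorem headD_drop (V : List Char) (i : Nat) (h : i < V.length) :
    (V.drop i).headD ' ' = V.getD i ' ' := by
  rw [List.drop_eq_getElem_cons h]
  simp [List.getD_eq_getElem?_getD, List.getElem?_eq_getElem h]

theorem tail_drop_cond (V : List Char) (i : Nat) :
    (V.drop i).tail = V.drop (if i < V.length then i + 1 else i) := by
  by_cases h : i < V.length
  · simp [h, List.tail_drop]
  · have h1 : V.drop i = [] := List.drop_eq_nil_of_le (Nat.not_lt.1 h)
    simp [h, h1]

theorem loop1_eq (f : Nat) : ∀ (V R : List Char) (i j : Nat),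
    aLoop1 f (V.drop i) (R.drop j)
      = Sum.map id (fun p => (V.drop p.1, R.drop p.2)) (bLoop1 f V R i j) := by
  induction f with
  | zero => intro V R i j; rfl
  | succ f ih =>
    intro V R i j
    simp only [aLoop1, bLoop1, hdNotDigit_drop, order_hd1_drop, tail_drop_cond]
    set vc := (if i < V.length then orderB (V.getD i ' ') else 0) with hvc
    set rc := (if j < R.length then orderB (R.getD j ' ') else 0) with hrc
    set i' := (if i < V.length then i + 1 else i) with hi'
    set j' := (if j < R.length then j + 1 else j) with hj'
    split_ifs with hc hne
    · simp
    · exact ih V R i' j'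
    · simp

theorem strip_eq (f : Nat) : ∀ (V : List Char) (i : Nat), V.length - i = f →
    aStrip (V.drop i) = V.drop (bStrip f V i) := by
  induction f with
  | zero =>
    intro V i hf
    have h1 : V.drop i = [] := List.drop_eq_nil_of_le (by omega)
    rw [show bStrip 0 V i = i from rfl, h1]
    rfl
  | succ f ih =>
    intro V i hf
    have h : i < V.length := by omega
    have hdrop : V.drop i = V.getD i ' ' :: V.drop (i + 1) := by
      rw [List.getD_eq_getElem?_getD, List.getElem?_eq_getElem h]
      exact List.drop_eq_getElem_cons h
    have hb : bStrip (f + 1) V i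
        = if i < V.length ∧ V.getD i ' ' = '0' then bStrip f V (i + 1) else i := rfl
    by_cases h0 : V.getD i ' ' = '0'
    · rw [hdrop]
      simp only [aStrip, h0, if_true]
      rw [hb, if_pos (And.intro h h0)]
      exact ih V (i + 1) (by omega)
    · rw [hdrop]
      simp only [aStrip, h0, if_false]
      rw [hb, if_neg (by tauto), ← hdrop]

theorem loop3_eq (f : Nat) : ∀ (V R : List Char) (i j : Nat) (fd : Int),
    aLoop3 f (V.drop i) (R.drop j) fd
      = (fun (p : Nat × Nat × Int) => (V.drop p.1, R.drop p.2.1, p.2.2)) (bLoop3 f V R i j fd) := by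
  induction f with
  | zero => intro V R i j fd; rfl
  | succ f ih =>
    intro V R i j fd
    simp only [aLoop3, bLoop3, hdIsDigit_drop]
    by_cases hc : (digAt V i && digAt R j) = true
    · have hc' := hc
      simp only [Bool.and_eq_true, digAt, decide_eq_true_eq] at hc'
      rw [if_pos hc, if_pos hc, headD_drop V i hc'.1.1, headD_drop R j hc'.2.1,
        List.tail_drop, List.tail_drop]
      exact ih V R (i + 1) (j + 1) _
    · rw [if_neg hc, if_neg hc]

theorem outer_eq (f : Nat) : ∀ (V R : List Char) (i j : Nat),
    aOuter f (V.drop i) (R.drop j) = bOuter f V R i j := by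
  induction f with
  | zero => intro V R i j; rfl
  | succ f ih =>
    intro V R i j
    simp only [aOuter, bOuter]
    by_cases hc : i < V.length ∨ j < R.length
    · have hne : ¬ (V.drop i = [] ∧ R.drop j = []) := by
        simp only [List.drop_eq_nil_iff]
        omega
      rw [if_neg hne, if_pos hc]
      have hlen : (V.drop i).length + (R.drop j).length
          = (V.length - i) + (R.length - j) := by simp
      rw [hlen, loop1_eq]
      generalize bLoop1 (V.length - i + (R.length - j)) V R i j = b1
      obtain res | ⟨i1, j1⟩ := b1
      · rfl
      · simp only [Sum.map_inr]
        rw [strip_eq (V.length - i1) V i1 rfl, strip_eq (R.length - j1) R j1 rfl]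
        generalize bStrip (V.length - i1) V i1 = i2
        generalize bStrip (R.length - j1) R j1 = j2
        have hlen2 : (V.drop i2).length + (R.drop j2).length
            = (V.length - i2) + (R.length - j2) := by simp
        rw [hlen2, loop3_eq]
        generalize bLoop3 ((V.length - i2) + (R.length - j2)) V R i2 j2 0 = q
        obtain ⟨i3, j3, fd⟩ := q
        simp only [hdIsDigit_drop]
        split_ifs with h1 h2 h3
        · rfl
        · rfl
        · rfl
        · exact ih V R i3 j3
    · have heq : V.drop i = [] ∧ R.drop j = [] := by
        simp only [List.drop_eq_nil_iff]
        omega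
      rw [if_pos heq, if_neg hc]

-- ===== VERDICT (by name: the statement is the Claim_ definition above) =====
theorem verrevcmp_spec : Claim_equal_verrevcmp := by
  intro val ref _
  show verrevcmp val ref = verrevcmp_alt val ref
  unfold verrevcmp verrevcmp_alt
  have := outer_eq (val.toList.length + ref.toList.length + 1) val.toList ref.toList 0 0
  simpa using this
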